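-- pv_equiv track=rewrite | github.com/BS-Algo/Algorithm | minjaeYoon/2025/2025-05/0501.py | solution
-- ===== SOURCE A (Python) =====
-- def solution(arr, flag):
--     answer = []
--     for i in range(len(flag)):
--         if flag[i]:
--             answer += [arr[i]] * (arr[i]*2)
--         elif not flag[i]:
--             if arr[i] <= len(answer):
--                 del answer[-arr[i]:]
--             else:
--                 answer.clear()
--
--     return answer
-- ===== SOURCE B (Python) =====
-- def solution(arr, flag):
--     # Run-length encoding of the answer: each append event pushes one
--     # (value, count) run, each delete event pops/trims runs against the
--     # virtual length; the list is materialised once at the end.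
--     runs = []          # stack of (value, count) runs, count > 0
--     total = 0          # current length of the encoded answer
--     for x, f in zip(arr, flag):
--         if f:
--             k = max(2 * x, 0)
--             if k:
--                 runs.append((x, k))
--                 total += k
--         else:
--             # the answer becomes answer[:-x]; resolve that bound against total
--             keep = slice(None, -x).indices(total)[1]
--             while total > keep:
--                 v, c = runs[-1]
--                 if total - c >= keep:
--                     runs.pop()
--                     total -= c
--                 else:
--                     runs[-1] = (v, c - (total - keep))
--                     total = keep
--     out = []
--     for v, c in runs:
--         out.extend([v] * c)
--     return out
-- ===== Notes on version B (the rewrite author's own statement) =====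
-- stated objective: alternative
-- what changed: Replaces materialised repeated-value appends and tail-slice deletions with a run-length stack of (value,count) pairs (push per append event, pop/trim per delete event with the slice bound resolved against the virtual length via slice.indices) expanded once at the end.
import Mathlib
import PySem

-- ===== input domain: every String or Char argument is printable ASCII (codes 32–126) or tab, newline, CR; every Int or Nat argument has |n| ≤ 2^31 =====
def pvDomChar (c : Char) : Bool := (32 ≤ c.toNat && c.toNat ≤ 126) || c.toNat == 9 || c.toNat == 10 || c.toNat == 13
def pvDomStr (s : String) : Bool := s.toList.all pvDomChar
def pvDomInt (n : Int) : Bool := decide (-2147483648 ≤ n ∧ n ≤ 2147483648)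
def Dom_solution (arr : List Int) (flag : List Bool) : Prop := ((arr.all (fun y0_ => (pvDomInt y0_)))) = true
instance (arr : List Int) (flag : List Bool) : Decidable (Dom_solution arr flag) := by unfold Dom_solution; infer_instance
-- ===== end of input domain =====

-- B replaces A's materialised appends/tail-deletions by a run-length stack of (value, count) pairs expanded once at the end.

-- ===== PORT A =====
-- one loop iteration of A: flag true → answer += [x]*(x*2)  ([v]*k is [] for k ≤ 0, hence (x*2).toNat);
-- flag false → del answer[-x:] (leaves answer[:-x], i.e. slice to -x) when x ≤ len(answer), else clear
def stepA (answer : List Int) (x : Int) (f : Bool) : List Int :=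
  if f then answer ++ List.replicate (x * 2).toNat x
  else if x ≤ (answer.length : Int) then PySem.List.slice answer none (some (-x))
  else []

def solution (arr : List Int) (flag : List Bool) : List Int :=
  (PySem.List.pyRange 0 flag.length 1).foldl
    (fun answer i => stepA answer (PySem.List.pyGetD arr i 0) (PySem.List.pyGetD flag i false)) []

-- ===== PORT B =====
-- Source B's `slice(None, -x).indices(total)[1]`: resolve the slice bound stop = -x against length
-- total, exactly CPython's slice.indices for step 1 (negative stop gets total added, then both
-- ends are clamped to [0, total]); ported by hand, exact for every Int x and Nat total
def keepLen (x : Int) (total : Nat) : Nat :=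
  if -x < 0 then ((total : Int) + -x).toNat else min (-x).toNat total

-- Source B's inner while-loop: pop / decrement the top run until the virtual length reaches keep
def popTo (keep : Nat) : List (Int × Nat) → Nat → List (Int × Nat) × Nat
  | [], total => ([], total)
  | (v, c) :: rest, total =>
    if total ≤ keep then ((v, c) :: rest, total)
    else if keep ≤ total - c then popTo keep rest (total - c)
    else ((v, c - (total - keep)) :: rest, keep)

-- one loop iteration of Source B (the stack's top is the list head, mirroring Python's append/pop at the end)
def stepB (s : List (Int × Nat) × Nat) (x : Int) (f : Bool) : List (Int × Nat) × Nat :=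
  if f then
    let k := (max (2 * x) 0).toNat
    if k ≠ 0 then ((x, k) :: s.1, s.2 + k) else s
  else
    popTo (keepLen x s.2) s.1 s.2

def solution_alt (arr : List Int) (flag : List Bool) : List Int :=
  let st := (List.zip arr flag).foldl (fun s p => stepB s p.1 p.2) ([], 0)
  st.1.reverse.foldl (fun out p => out ++ List.replicate p.2 p.1) []

-- ===== PRECONDITION & SPEC =====
-- A indexes arr[i] for every i < len(flag): it raises IndexError iff len(flag) > len(arr)
def Pre_solution (arr : List Int) (flag : List Bool) : Prop := flag.length ≤ arr.length
instance (arr : List Int) (flag : List Bool) : Decidable (Pre_solution arr flag) := by unfold Pre_solution; infer_instance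
def pvWitness_solution : List Int × List Bool := ([2, 1], [true, false])

def Spec_solution (arr : List Int) (flag : List Bool) (out : List Int) : Prop := out = solution_alt arr flag
instance (arr : List Int) (flag : List Bool) (out : List Int) : Decidable (Spec_solution arr flag out) := by unfold Spec_solution; infer_instance

-- ===== CLAIM (what is proved, stated in full; the proofs are below) =====
def Claim_equal_solution : Prop := ∀ (arr : List Int) (flag : List Bool), Dom_solution arr flag → Pre_solution arr flag → Spec_solution arr flag (solution arr flag)

-- ===== LEMMAS AND PROOFS =====

-- what a run-length stack denotes (top of stack = head ⇒ its run is last)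
def render (rs : List (Int × Nat)) : List Int :=
  rs.reverse.flatMap (fun p => List.replicate p.2 p.1)

theorem render_cons (v : Int) (c : Nat) (rest : List (Int × Nat)) :
    render ((v, c) :: rest) = render rest ++ List.replicate c v := by
  simp [render]

theorem popTo_spec (keep : Nat) :
    ∀ (rs : List (Int × Nat)) (total : Nat), total = (render rs).length →
      render (popTo keep rs total).1 = (render rs).take keep ∧
        (popTo keep rs total).2 = min total keep := by
  intro rs
  induction rs with
  | nil => intro total h; simp [render] at h; subst h; simp [popTo, render]
  | cons p rest ih =>
    obtain ⟨v, c⟩ := p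
    intro total h
    rw [render_cons] at h ⊢
    simp only [List.length_append, List.length_replicate] at h
    by_cases h1 : total ≤ keep
    · simp only [popTo, if_pos h1]
      exact ⟨by rw [render_cons, List.take_of_length_le (by simp; omega)], by omega⟩
    · simp only [popTo, if_neg h1]
      by_cases h2 : keep ≤ total - c
      · simp only [if_pos h2]
        have := ih (total - c) (by omega)
        refine ⟨?_, by omega⟩
        rw [this.1, List.take_append_of_le_length (by omega)]
      · simp only [if_neg h2]
        refine ⟨?_, by omega⟩
        rw [render_cons, List.take_append, List.take_of_length_le (by omega),
          List.take_replicate]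
        congr 2
        omega

-- one delete-step of A is a take of the current answer, at the resolved slice bound
theorem stepA_false_eq_take (ans : List Int) (x : Int) :
    stepA ans x false = ans.take (keepLen x ans.length) := by
  simp only [stepA, Bool.false_eq_true, if_false, keepLen]
  by_cases hx : -x < 0
  · rw [if_pos hx]
    by_cases hle : x ≤ (ans.length : Int)
    · rw [if_pos hle, show -x = -((x.toNat : Nat) : Int) by omega,
        PySem.List.slice_to_neg_natCast _ _ (by omega)]
      congr 1
      omega
    · rw [if_neg hle, show (((ans.length : Nat) : Int) + -x).toNat = 0 by omega, List.take_zero]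
  · rw [if_neg hx, if_pos (by omega : x ≤ (ans.length : Int)),
      PySem.List.slice_to _ (by omega : (0:Int) ≤ -x), ← List.take_take, List.take_length]

-- one step preserves the invariant: the stack denotes A's answer and the counter its length
theorem stepB_spec (ans : List Int) (x : Int) (f : Bool) (s : List (Int × Nat) × Nat)
    (h1 : render s.1 = ans) (h2 : s.2 = ans.length) :
    render (stepB s x f).1 = stepA ans x f ∧ (stepB s x f).2 = (stepA ans x f).length := by
  obtain ⟨rs, total⟩ := s
  simp only at h1 h2
  subst h1 h2
  cases f with
  | true =>
    by_cases hx : (max (2 * x) 0).toNat ≠ 0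
    · simp only [stepB, stepA, if_pos hx, if_true]
      rw [render_cons, show (max (2 * x) 0).toNat = (x * 2).toNat by omega]
      simp
    · have hz : (x * 2).toNat = 0 := by omega
      simp [stepB, stepA, hx, hz]
  | false =>
    simp only [stepB, Bool.false_eq_true, if_false]
    rw [stepA_false_eq_take]
    have htle : keepLen x (render rs).length ≤ (render rs).length := by
      unfold keepLen; split_ifs <;> omega
    refine ⟨(popTo_spec _ rs _ rfl).1, ?_⟩
    rw [(popTo_spec _ rs _ rfl).2, List.length_take]
    omega

-- the whole loop preserves the invariant
theorem loop_spec : ∀ (ps : List (Int × Bool)) (s : List (Int × Nat) × Nat) (ans : List Int),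
    render s.1 = ans → s.2 = ans.length →
    render ((ps.foldl (fun s p => stepB s p.1 p.2) s).1)
        = ps.foldl (fun ans p => stepA ans p.1 p.2) ans ∧
      (ps.foldl (fun s p => stepB s p.1 p.2) s).2
        = (ps.foldl (fun ans p => stepA ans p.1 p.2) ans).length := by
  intro ps
  induction ps with
  | nil => intro s ans h1 h2; exact ⟨h1, h2⟩
  | cons p rest ih =>
    intro s ans h1 h2
    have := stepB_spec ans p.1 p.2 s h1 h2
    simpa using ih (stepB s p.1 p.2) (stepA ans p.1 p.2) this.1 this.2

-- A's index loop over range(len(flag)) is the fold over zip(arr, flag) when len(flag) ≤ len(arr)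
theorem foldl_range_eq_foldl_zip {σ : Type} (g : σ → Int → Bool → σ) :
    ∀ (flag : List Bool) (arr : List Int), flag.length ≤ arr.length → ∀ (init : σ),
      (PySem.List.pyRange 0 flag.length 1).foldl
          (fun s i => g s (PySem.List.pyGetD arr i 0) (PySem.List.pyGetD flag i false)) init
        = (List.zip arr flag).foldl (fun s p => g s p.1 p.2) init := by
  intro flag
  induction flag with
  | nil => intro arr _ init; simp
  | cons f fs ih =>
    intro arr hlen init
    simp only [List.length_cons] at hlen
    obtain ⟨a, as, rfl⟩ : ∃ a as, arr = a :: as := by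
      cases arr with
      | nil => simp at hlen
      | cons a as => exact ⟨a, as, rfl⟩
    simp only [List.length_cons] at hlen
    have hcast : (((f :: fs).length : Nat) : Int) = (fs.length : Int) + 1 := by
      simp
    rw [hcast, PySem.List.pyRange_one_cons (by omega), List.foldl_cons,
      show (PySem.List.pyGetD (a :: as) 0 0) = a from PySem.List.pyGetD_zero_cons a as 0,
      show (PySem.List.pyGetD (f :: fs) 0 false) = f from PySem.List.pyGetD_zero_cons f fs false]
    have hshift :
        PySem.List.pyRange (0 + 1) ((fs.length : Int) + 1) 1
          = (PySem.List.pyRange 0 fs.length 1).map (fun i => i + 1) := by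
      rw [PySem.List.pyRange_one, PySem.List.pyRange_one, List.map_map]
      have : ((fs.length : Int) + 1 - (0 + 1)).toNat = ((fs.length : Int) - 0).toNat := by omega
      rw [this]
      exact List.map_congr_left (fun k _ => by simp [Function.comp]; ring)
    rw [hshift, List.foldl_map, List.zip_cons_cons, List.foldl_cons]
    calc (PySem.List.pyRange 0 fs.length 1).foldl
          (fun s i => g s (PySem.List.pyGetD (a :: as) (i + 1) 0)
            (PySem.List.pyGetD (f :: fs) (i + 1) false)) (g init a f)
        = (PySem.List.pyRange 0 fs.length 1).foldl
          (fun s i => g s (PySem.List.pyGetD as i 0) (PySem.List.pyGetD fs i false))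
          (g init a f) := by
          apply PySem.List.foldl_congr_mem
          intro s i hi
          rw [PySem.List.mem_pyRange_one] at hi
          obtain ⟨k, rfl⟩ : ∃ k : Nat, i = (k : Int) := ⟨i.toNat, by omega⟩
          rw [show (k : Int) + 1 = ((k + 1 : Nat) : Int) by push_cast; ring]
          simp only [PySem.List.pyGetD_natCast, List.getD_cons_succ]
      _ = (as.zip fs).foldl (fun s p => g s p.1 p.2) (g init a f) :=
          ih as (by omega) (g init a f)

-- ===== VERDICT (by name: the statement is the Claim_ definition above) =====
theorem solution_spec : Claim_equal_solution := by
  intro arr flag _ hpre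
  unfold Spec_solution solution solution_alt
  rw [foldl_range_eq_foldl_zip (fun s x f => stepA s x f) flag arr hpre]
  have h := loop_spec (arr.zip flag) ([], 0) [] rfl rfl
  rw [PySem.List.foldl_append_eq_flatMap]
  simpa [render] using h.1.symm
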